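-- pv_equiv track=rewrite | github.com/AP-MI-2021/lab-3-EduardBarna | main.py | get_longest_all_palindromes
-- ===== SOURCE A (Python) =====
-- def is_palindrome(n):
--     '''
--     verifica daca un nr este prim
--     :param n: numarul pe care il verificam sa fie palindrom
--     :return: True, daca nur este palindrom si False daca nu este
--     '''
--     x=str(n)
--     if x == x[::-1]:
--         return True
--     else:
--         return False
--
-- def get_longest_all_palindromes(l):
--     '''
--     determina cea mai lunga subsecventa care contine palindroame
--     :param l: lista initiala
--     :return: subsecventa cea mai lunga care contine palindroame
--     '''
--     subsecventa_max=[]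
--     start = -1
--     for i in range(len(l)):
--         if is_palindrome(l[i]):
--             if start == -1:  # daca  nu ne aflam intr-o subsecventa
--                 start = i  #incepem subseventa de la pozitia i
--             if len(subsecventa_max) < i-start+1:  #daca lungimea subsecventei max este mai mica decat lungimea subsecventei curente
--                 subsecventa_max = l[start:i+1]
--         else:
--             start = -1
--     return subsecventa_max
-- ===== SOURCE B (Python) =====
-- def is_palindrome(n):
--     '''
--     verifica daca un nr este prim
--     :param n: numarul pe care il verificam sa fie palindrom
--     :return: True, daca nur este palindrom si False daca nu este
--     '''
--     x = str(n)
--     if x == x[::-1]: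
--         return True
--     else:
--         return False
--
-- def get_longest_all_palindromes(l):
--     '''
--     Partition l into maximal contiguous blocks of palindromes, then return the
--     longest block (first one on ties), or [] if there is none.
--     '''
--     runs = []
--     cur = []
--     for x in l:
--         if is_palindrome(x):
--             cur.append(x)
--         else:
--             if cur:
--                 runs.append(cur)
--             cur = []
--     if cur:
--         runs.append(cur)
--     return max(runs, key=len, default=[])
-- ===== Notes on version B (the rewrite author's own statement) =====
-- stated objective: simpler
-- what changed: Replaces the index/start/slice running-best sweep with a partition into maximal contiguous palindrome runs followed by max(runs, key=len) with an empty-list default (first-wins on ties).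
import Mathlib
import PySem

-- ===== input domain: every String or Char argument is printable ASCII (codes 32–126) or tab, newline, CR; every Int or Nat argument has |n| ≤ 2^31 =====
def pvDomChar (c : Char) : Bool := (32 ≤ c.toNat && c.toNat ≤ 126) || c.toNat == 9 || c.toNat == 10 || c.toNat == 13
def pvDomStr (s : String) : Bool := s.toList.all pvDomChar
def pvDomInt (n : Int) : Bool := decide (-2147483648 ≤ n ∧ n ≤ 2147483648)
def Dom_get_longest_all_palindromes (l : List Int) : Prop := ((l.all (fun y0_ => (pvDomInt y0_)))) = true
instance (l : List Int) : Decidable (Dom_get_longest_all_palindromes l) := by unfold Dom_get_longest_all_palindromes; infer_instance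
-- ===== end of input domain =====

-- B replaces A's index/start/slice running-best sweep by a partition into maximal
-- contiguous palindrome runs followed by max(runs, key=len, default=[]) (objective: simpler).

-- ===== PORT A =====
-- shared helper is_palindrome (identical in Source A and Source B): x = str(n); x == x[::-1]
def is_palindrome (n : Int) : Bool :=
  let x := PySem.Int.toStr n
  if some x = PySem.Str.slice? x none none (-1) then true else false

def get_longest_all_palindromes (l : List Int) : List Int :=
  ((PySem.List.pyRange 0 (l.length : Int) 1).foldl
    (fun (acc : List Int × Int) i =>
      if is_palindrome (PySem.List.pyGetD l i 0) then
        let start := if acc.2 = -1 then i else acc.2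
        ((if (acc.1.length : Int) < i - start + 1
          then PySem.List.slice l (some start) (some (i + 1)) else acc.1), start)
      else (acc.1, -1)) ([], -1)).1

-- ===== PORT B =====
def get_longest_all_palindromes_alt (l : List Int) : List Int :=
  let q := l.foldl
    (fun (acc : List (List Int) × List Int) x =>
      if is_palindrome x then (acc.1, acc.2 ++ [x])
      else (if acc.2 = [] then acc.1 else acc.1 ++ [acc.2], [])) ([], [])
  let runs := if q.2 = [] then q.1 else q.1 ++ [q.2]
  PySem.List.maxD runs (fun r => (r.length : Int)) []

-- ===== PRECONDITION & SPEC =====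
def Spec_get_longest_all_palindromes (l : List Int) (out : List Int) : Prop := out = get_longest_all_palindromes_alt l
instance (l : List Int) (out : List Int) : Decidable (Spec_get_longest_all_palindromes l out) := by unfold Spec_get_longest_all_palindromes; infer_instance

-- ===== CLAIM (what is proved, stated in full; the proofs are below) =====
def Claim_equal_get_longest_all_palindromes : Prop := ∀ (l : List Int), Dom_get_longest_all_palindromes l → Spec_get_longest_all_palindromes l (get_longest_all_palindromes l)

-- ===== LEMMAS AND PROOFS =====

-- running-best step: keep the current best unless the new run is strictly longer
def bstep (b r : List Int) : List Int := if (b.length : Int) < r.length then r else b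

-- reference sweep: (best so far, current trailing palindrome run)
def bcstep (acc : List Int × List Int) (x : Int) : List Int × List Int :=
  if is_palindrome x then (bstep acc.1 (acc.2 ++ [x]), acc.2 ++ [x]) else (acc.1, [])

def bc (t : List Int) : List Int × List Int := t.foldl bcstep ([], [])

theorem bc_append (t : List Int) (a : Int) : bc (t ++ [a]) = bcstep (bc t) a := by
  simp [bc, List.foldl_append]

theorem bstep_nil (b : List Int) : bstep b [] = b := by simp [bstep]

theorem bstep_absorb (b c : List Int) (a : Int) :
    bstep (bstep b c) (c ++ [a]) = bstep b (c ++ [a]) := by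
  simp only [bstep, List.length_append, List.length_cons, List.length_nil]
  split_ifs <;> first | rfl | (exfalso; omega)

-- the trailing run is a suffix of the prefix processed so far
theorem bc_run_suffix (t : List Int) :
    (bc t).2.length ≤ t.length ∧ (bc t).2 = t.drop (t.length - (bc t).2.length) := by
  induction t using List.reverseRecOn with
  | nil => simp [bc]
  | append_singleton t a ih =>
    rw [bc_append]
    rcases ih with ⟨hle, hsuf⟩
    by_cases hp : is_palindrome a
    · simp only [bcstep, hp, if_pos]
      constructor
      · simp; omega
      · have h1 : t.length + 1 - ((bc t).2.length + 1) = t.length - (bc t).2.length := by omega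
        simp only [List.length_append, List.length_cons, List.length_nil, h1]
        rw [List.drop_append_of_le_length (by omega)]
        rw [← hsuf]
    · simp [bcstep, hp]

-- characterization of A's fold: best = (bc prefix).1, start encodes the trailing run
theorem A_char (l : List Int) (k : Nat) (hk : k ≤ l.length) :
    (PySem.List.pyRange 0 (k : Int) 1).foldl
      (fun (acc : List Int × Int) i =>
        if is_palindrome (PySem.List.pyGetD l i 0) then
          let start := if acc.2 = -1 then i else acc.2
          ((if (acc.1.length : Int) < i - start + 1
            then PySem.List.slice l (some start) (some (i + 1)) else acc.1), start)
        else (acc.1, -1)) ([], -1)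
      = ((bc (l.take k)).1,
         if (bc (l.take k)).2 = [] then -1 else (k : Int) - (bc (l.take k)).2.length) := by
  induction k with
  | zero => simp [PySem.List.pyRange_one_eq_nil, bc]
  | succ k ih =>
    have hk' : k ≤ l.length := by omega
    have hklt : k < l.length := by omega
    have hrange : PySem.List.pyRange 0 ((k + 1 : Nat) : Int) 1
        = PySem.List.pyRange 0 (k : Int) 1 ++ [(k : Int)] := by
      push_cast
      exact PySem.List.pyRange_one_succ_right (Int.natCast_nonneg k)
    rw [hrange, List.foldl_append, ih hk']
    have hget : PySem.List.pyGetD l (k : Int) 0 = l[k] := by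
      simp [PySem.List.pyGetD_natCast, List.getD_eq_getElem?_getD, List.getElem?_eq_getElem hklt]
    have htake : l.take (k + 1) = l.take k ++ [l[k]] := List.take_succ_eq_append_getElem hklt
    have htlen : (l.take k).length = k := by simp [hk']
    obtain ⟨hcle, hcsuf⟩ := bc_run_suffix (l.take k)
    rw [htlen] at hcle hcsuf
    rw [htake, bc_append]
    simp only [List.foldl_cons, List.foldl_nil, hget]
    by_cases hp : is_palindrome l[k]
    · simp only [bcstep, hp, if_pos]
      by_cases hc : (bc (l.take k)).2 = []
      · -- start was -1, a new run of length 1 begins at k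
        simp only [hc, if_pos, List.nil_append]
        have hs : PySem.List.slice l (some (k : Int)) (some ((k : Int) + 1)) = [l[k]] := by
          have he : ((k : Int) + 1) = ((k + 1 : Nat) : Int) := by push_cast; ring
          have hd : List.drop k l = l[k] :: List.drop (k + 1) l := List.drop_eq_getElem_cons hklt
          have h1 : k + 1 - k = 1 := by omega
          rw [he, PySem.List.slice_natCast, h1, hd, List.take_succ_cons, List.take_zero]
        simp only [hs, Prod.mk.injEq]
        constructor
        · simp only [bstep, List.length_cons, List.length_nil]
          split_ifs with h1 h2 h2 <;> first | rfl | (exfalso; push_cast at h1 h2 ⊢; omega)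
        · simp only [List.cons_ne_nil, if_neg, not_false_iff, List.length_cons, List.length_nil]
          push_cast; ring
    -- start keeps pointing at the beginning of the current run
      · have hs2 : ¬ ((k : Int) - (bc (l.take k)).2.length = -1) := by
          have : 0 < (bc (l.take k)).2.length := List.length_pos_of_ne_nil hc
          omega
        simp only [hc, hs2, if_false]
        set c := (bc (l.take k)).2 with hcdef
        have hslice : PySem.List.slice l (some ((k : Int) - c.length)) (some ((k : Int) + 1))
            = c ++ [l[k]] := by
          have he1 : (k : Int) - c.length = ((k - c.length : Nat) : Int) := by omega
          have he2 : (k : Int) + 1 = ((k + 1 : Nat) : Int) := by push_cast; ring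
          rw [he1, he2, PySem.List.slice_natCast]
          have h1 : k + 1 - (k - c.length) = c.length + 1 := by omega
          rw [h1]
          have h2 : c ++ [l[k]] = (l.take (k + 1)).drop (k - c.length) := by
            conv_lhs => rw [hcsuf]
            rw [htake, List.drop_append_of_le_length (by omega)]
          rw [h2, List.drop_take]
          have h3 : k + 1 - (k - c.length) = c.length + 1 := by omega
          rw [h3]
        simp only [Prod.mk.injEq]
        constructor
        · rw [hslice]
          simp only [bstep, List.length_append, List.length_cons, List.length_nil]
          split_ifs with h1 h2 h2 <;> first | rfl | (exfalso; push_cast at h1 h2 ⊢; omega)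
        · have hne : ¬ (c ++ [l[k]] = []) := by simp
          simp only [hne, if_neg, not_false_iff]
          simp only [List.length_append, List.length_cons, List.length_nil]
          push_cast; ring
    · simp [bcstep, hp]

-- characterization of B's run-building fold against the reference sweep
theorem B_char (t : List Int) :
    (t.foldl
      (fun (acc : List (List Int) × List Int) x =>
        if is_palindrome x then (acc.1, acc.2 ++ [x])
        else (if acc.2 = [] then acc.1 else acc.1 ++ [acc.2], [])) ([], [])).2 = (bc t).2
    ∧ (∀ r ∈ (t.foldl
      (fun (acc : List (List Int) × List Int) x =>
        if is_palindrome x then (acc.1, acc.2 ++ [x])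
        else (if acc.2 = [] then acc.1 else acc.1 ++ [acc.2], [])) ([], [])).1, r ≠ [])
    ∧ (bc t).1 = ((t.foldl
      (fun (acc : List (List Int) × List Int) x =>
        if is_palindrome x then (acc.1, acc.2 ++ [x])
        else (if acc.2 = [] then acc.1 else acc.1 ++ [acc.2], [])) ([], [])).1
        ++ [(t.foldl
      (fun (acc : List (List Int) × List Int) x =>
        if is_palindrome x then (acc.1, acc.2 ++ [x])
        else (if acc.2 = [] then acc.1 else acc.1 ++ [acc.2], [])) ([], [])).2]).foldl bstep [] := by
  induction t using List.reverseRecOn with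
  | nil => simp [bc, bstep]
  | append_singleton t a ih =>
    rw [bc_append, List.foldl_append]
    obtain ⟨ih2, ihmem, ih1⟩ := ih
    set q := t.foldl
      (fun (acc : List (List Int) × List Int) x =>
        if is_palindrome x then (acc.1, acc.2 ++ [x])
        else (if acc.2 = [] then acc.1 else acc.1 ++ [acc.2], [])) ([], []) with hq
    simp only [List.foldl_cons, List.foldl_nil]
    by_cases hp : is_palindrome a
    · simp only [bcstep, hp, if_pos]
      refine ⟨by simp [ih2], by simpa using ihmem, ?_⟩
      rw [ih1]
      rw [List.foldl_append, List.foldl_append]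
      simp only [List.foldl_cons, List.foldl_nil, ih2]
      exact bstep_absorb _ _ _
    · simp only [bcstep, hp, if_neg, Bool.false_eq_true, not_false_iff]
      by_cases hnil : q.2 = []
      · simp only [hnil, if_pos]
        refine ⟨by trivial, ihmem, ?_⟩
        rw [ih1, List.foldl_append, List.foldl_append]
        simp [hnil, bstep_nil]
      · simp only [hnil, if_neg, not_false_iff]
        refine ⟨by trivial, ?_, ?_⟩
        · intro r hr
          rcases List.mem_append.1 hr with h | h
          · exact ihmem r h
          · simp at h; subst h; exact hnil
        · rw [ih1, List.foldl_append, List.foldl_append, List.foldl_append]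
          simp [bstep_nil]

-- PySem.List.max? on a nonempty list with the length key is the bstep fold
theorem max?_cons_fold (rs : List (List Int)) (m : List Int) :
    PySem.List.max? (m :: rs) (fun r => (r.length : Int)) = some (rs.foldl bstep m) := by
  induction rs generalizing m with
  | nil => simp [PySem.List.max?]
  | cons r rs ih =>
    have h1 : PySem.List.max? (m :: r :: rs) (fun r => (r.length : Int))
        = PySem.List.max? (bstep m r :: rs) (fun r => (r.length : Int)) := by
      simp only [PySem.List.max?, List.foldl_cons]
      congr 1
      simp only [bstep]
      split_ifs <;> rfl
    rw [h1, ih, List.foldl_cons]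

theorem maxD_eq_foldl (rs : List (List Int)) (h : ∀ r ∈ rs, r ≠ []) :
    PySem.List.maxD rs (fun r => (r.length : Int)) [] = rs.foldl bstep [] := by
  cases rs with
  | nil => rfl
  | cons r rs =>
    have hr : r ≠ [] := h r (by simp)
    rw [PySem.List.maxD, max?_cons_fold, Option.getD_some, List.foldl_cons]
    have : bstep [] r = r := by
      simp only [bstep, List.length_nil]
      rw [if_pos]
      exact_mod_cast List.length_pos_of_ne_nil hr
    rw [this]

-- ===== VERDICT (by name: the statement is the Claim_ definition above) =====
theorem get_longest_all_palindromes_spec : Claim_equal_get_longest_all_palindromes := by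
  intro l _
  unfold Spec_get_longest_all_palindromes
  unfold get_longest_all_palindromes get_longest_all_palindromes_alt
  rw [A_char l l.length (le_refl _)]
  simp only [List.take_length]
  obtain ⟨h2, hmem, h1⟩ := B_char l
  set q := l.foldl
    (fun (acc : List (List Int) × List Int) x =>
      if is_palindrome x then (acc.1, acc.2 ++ [x])
      else (if acc.2 = [] then acc.1 else acc.1 ++ [acc.2], [])) ([], []) with hq
  by_cases hnil : q.2 = []
  · simp only [hnil, if_pos]
    rw [maxD_eq_foldl q.1 hmem, h1, hnil, List.foldl_append]
    simp [bstep_nil]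
  · simp only [hnil, if_neg, not_false_iff]
    rw [maxD_eq_foldl (q.1 ++ [q.2]) ?_, h1]
    intro r hr
    rcases List.mem_append.1 hr with h | h
    · exact hmem r h
    · simp at h; subst h; exact hnil
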